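-- pv_equiv track=rewrite | github.com/d2rivendell/algorithm-source-code | algorithm/number.py | pick_fruit
-- ===== SOURCE A (Python) =====
-- def pick_fruit(apples, picks):
--      day = len(picks)
--      output = [0] * day
--      for a in apples:
--         i = 0
--         while a > 0 and i < day:
--              p = picks[i] if a >= picks[i] else a
--              output[i] = output[i] + p
--              i += 1
--              a -= p
--      return output
-- ===== SOURCE B (Python) =====
-- def _bisect_left(xs, x, lo=0):
--     hi = len(xs)
--     while lo < hi:
--         mid = (lo + hi) // 2
--         if xs[mid] < x:
--             lo = mid + 1
--         else:
--             hi = mid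
--     return lo
--
--
-- def pick_fruit(apples, picks):
--     xs = sorted(apples)
--     n = len(xs)
--     pre = [0]
--     for x in xs:
--         pre.append(pre[-1] + x)
--     output = []
--     done = 0  # total picked per surviving apple so far
--     m = 0     # apples before index m are exhausted (exhausted apples form a growing prefix)
--     for p in picks:
--         m = _bisect_left(xs, done + 1, m)      # first apple still bearing fruit
--         hi = _bisect_left(xs, done + p + 1, m)  # first apple that outlasts today
--         output.append((pre[hi] - pre[m]) - done * (hi - m) + p * (n - hi))
--         done += p
--     return output
-- ===== Notes on version B (the rewrite author's own statement) =====
-- stated objective: faster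
-- what changed: Instead of simulating each apple's greedy day-by-day depletion (inner while loop per apple), B sorts the apples once, builds prefix sums, and computes each whole day's total intake in O(log n): exhausted apples form a growing prefix of the sorted list tracked by a monotone start pointer, and a lower-bounded binary search splits the remaining apples into those that finish today (prefix-sum contribution) and those that give the full day's pick.
import Mathlib
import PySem

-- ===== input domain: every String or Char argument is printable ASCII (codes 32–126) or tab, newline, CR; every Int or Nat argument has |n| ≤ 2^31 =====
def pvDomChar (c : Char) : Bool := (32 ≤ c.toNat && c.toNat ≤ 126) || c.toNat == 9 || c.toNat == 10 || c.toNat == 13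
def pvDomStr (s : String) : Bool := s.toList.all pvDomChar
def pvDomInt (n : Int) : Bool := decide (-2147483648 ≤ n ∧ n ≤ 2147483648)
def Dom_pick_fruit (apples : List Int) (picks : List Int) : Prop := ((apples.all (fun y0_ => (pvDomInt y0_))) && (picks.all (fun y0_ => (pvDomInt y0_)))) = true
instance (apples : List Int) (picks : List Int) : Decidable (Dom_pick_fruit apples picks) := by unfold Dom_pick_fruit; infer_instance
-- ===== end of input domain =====

-- B sorts the apples once and, per day, aggregates the whole day's intake from prefix sums
-- between a monotone start pointer (exhausted apples form a growing prefix) and a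
-- lower-bounded binary search, instead of A's per-apple day-by-day simulation
-- (asymptotically faster).

-- ===== PORT A =====
-- inner 'while a > 0 and i < day' loop of A, updating output in place
def pickInnerA (picks : List Int) (day : Nat) (a : Int) (i : Nat) (out : List Int) : List Int :=
  if _h : 0 < a ∧ i < day then
    let pi := picks.getD i 0
    let p := if pi ≤ a then pi else a
    pickInnerA picks day (a - p) (i + 1) (out.set i (out.getD i 0 + p))
  else out
termination_by day - i
decreasing_by omega


def pick_fruit (apples : List Int) (picks : List Int) : List Int :=
  apples.foldl (fun out a => pickInnerA picks picks.length a 0 out)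
    (List.replicate picks.length 0)


-- ===== PORT B =====
-- hand-written _bisect_left(xs, x, lo) of Source B (the classic bisect loop with a lower
-- bound); fuel = len xs bounds the halving iterations
def blLoop (xs : List Int) (x : Int) : Nat → Nat → Nat → Nat
  | 0, lo, _ => lo
  | fuel + 1, lo, hi =>
    if lo < hi then
      match xs[(lo + hi) / 2]? with
      | some y => if y < x then blLoop xs x fuel ((lo + hi) / 2 + 1) hi
                  else blLoop xs x fuel lo ((lo + hi) / 2)
      | none => lo
    else lo

def blFrom (xs : List Int) (x : Int) (lo : Nat) : Nat := blLoop xs x xs.length lo xs.length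

def preB (xs : List Int) : List Int :=
  xs.foldl (fun pre x => pre ++ [pre.getLastD 0 + x]) [0]

def pick_fruit_alt (apples : List Int) (picks : List Int) : List Int :=
  let xs := PySem.List.sorted apples (fun x => x) false
  let n := xs.length
  let pre := preB xs
  (picks.foldl (fun (st : Int × Nat × List Int) p =>
      let m := blFrom xs (st.1 + 1) st.2.1
      let hi := blFrom xs (st.1 + p + 1) m
      (st.1 + p, m,
       st.2.2 ++ [(pre.getD hi 0 - pre.getD m 0) - st.1 * ((hi : Int) - (m : Int))
                  + p * ((n : Int) - (hi : Int))]))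
    ((0 : Int), (0 : Nat), ([] : List Int))).2.2


-- ===== PRECONDITION & SPEC =====
def Spec_pick_fruit (apples : List Int) (picks : List Int) (out : List Int) : Prop := out = pick_fruit_alt apples picks
instance (apples : List Int) (picks : List Int) (out : List Int) : Decidable (Spec_pick_fruit apples picks out) := by unfold Spec_pick_fruit; infer_instance

-- ===== CLAIM (what is proved, stated in full; the proofs are below) =====
def Claim_equal_pick_fruit : Prop := ∀ (apples : List Int) (picks : List Int), Dom_pick_fruit apples picks → Spec_pick_fruit apples picks (pick_fruit apples picks)

-- ===== LEMMAS AND PROOFS =====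

def pvP (picks : List Int) (i : Nat) : Int := (picks.take i).sum

-- max over u ∈ [s..i] of (pvP u - pvP s): the hurdle an apple must clear to still be
-- positive when day i starts (relative to start day s)
def pvM (picks : List Int) (s i : Nat) : Int :=
  if s < i then max 0 (picks.getD s 0 + pvM picks (s+1) i) else 0
termination_by i - s
decreasing_by omega

theorem pvM_nonneg (picks : List Int) (s i : Nat) : 0 ≤ pvM picks s i := by
  rw [pvM]; split
  · exact le_max_left 0 _
  · exact le_refl 0

theorem pvM_self (picks : List Int) (s : Nat) : pvM picks s s = 0 := by
  rw [pvM]; simp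

theorem pvP_succ (picks : List Int) (s : Nat) (hs : s < picks.length) :
    pvP picks (s + 1) = pvP picks s + picks.getD s 0 := by
  unfold pvP; rw [List.getD_eq_getElem picks 0 hs, List.sum_take_succ]

theorem pickInnerA_getD (picks : List Int) (day : Nat) (a : Int) (s : Nat) (out : List Int)
    (hd : day = picks.length) (hlen : out.length = day)
    (i : Nat) (hi : i < day) :
    (pickInnerA picks day a s out).getD i 0 =
      out.getD i 0 + (if s ≤ i ∧ pvM picks s i < a
        then min (picks.getD i 0) (a - (pvP picks i - pvP picks s)) else 0) := by
  induction a, s, out using pickInnerA.induct picks day with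
  | case2 a s out h =>
      rw [pickInnerA, dif_neg h]
      have hM := pvM_nonneg picks s i
      split_ifs with hc
      · exfalso
        exact h ⟨by omega, by omega⟩
      · omega
  | case1 a s out h pi p ih =>
      have hlen' : (out.set s (out.getD s 0 + p)).length = day := by simpa using hlen
      have ihh := ih hlen'
      simp only [p, pi, dite_eq_ite] at ihh
      rw [pickInnerA, dif_pos h]
      simp only []
      rw [ihh]
      have hsd : s < picks.length := hd ▸ h.2
      have hslen : s < out.length := by omega
      have hsucc := pvP_succ picks s hsd
      by_cases his : i = s
      · subst his
        rw [show (out.set i (out.getD i 0 + (if picks.getD i 0 ≤ a then picks.getD i 0 else a))).getD i 0 = out.getD i 0 + (if picks.getD i 0 ≤ a then picks.getD i 0 else a) by simp [List.getD_eq_getElem?_getD, hslen]]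
        have hM := pvM_self picks i
        simp only [show ¬ (i + 1 ≤ i) by omega, false_and, if_false, add_zero]
        have hcond : i ≤ i ∧ pvM picks i i < a := ⟨le_refl i, by omega⟩
        rw [if_pos hcond]
        have he : pvP picks i - pvP picks i = 0 := by ring
        rw [he, sub_zero]
        simp [min_def]
      · rw [show (out.set s (out.getD s 0 + (if picks.getD s 0 ≤ a then picks.getD s 0 else a))).getD i 0 = out.getD i 0 by simp [List.getD_eq_getElem?_getD, List.getElem?_set_ne (fun e => his e.symm)]]
        congr 1
        by_cases hsi : s < i
        · have hMi : pvM picks s i = max 0 (picks.getD s 0 + pvM picks (s+1) i) := by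
            rw [pvM, if_pos hsi]
          have hK := pvM_nonneg picks (s+1) i
          have ha := h.1
          by_cases hc : picks.getD s 0 ≤ a
          · simp only [if_pos hc]
            have hiff : (s + 1 ≤ i ∧ pvM picks (s+1) i < a - picks.getD s 0) ↔
                (s ≤ i ∧ pvM picks s i < a) := by
              rw [hMi]; constructor
              · rintro ⟨h1, h2⟩
                refine ⟨by omega, ?_⟩
                simp only [max_lt_iff]; omega
              · rintro ⟨h1, h2⟩
                simp only [max_lt_iff] at h2
                exact ⟨by omega, by omega⟩
            have hX : a - picks.getD s 0 - (pvP picks i - pvP picks (s+1)) =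
                a - (pvP picks i - pvP picks s) := by omega
            rw [hX, if_congr hiff rfl rfl]
          · simp only [if_neg hc]
            have h1 : ¬ (s + 1 ≤ i ∧ pvM picks (s+1) i < a - a) := by
              rintro ⟨_, h2⟩; omega
            have h2 : ¬ (s ≤ i ∧ pvM picks s i < a) := by
              rintro ⟨_, h2⟩; rw [hMi] at h2
              simp only [max_lt_iff] at h2
              omega
            rw [if_neg h1, if_neg h2]
        · have h1 : ¬ (s + 1 ≤ i ∧ pvM picks (s+1) i <
              a - (if picks.getD s 0 ≤ a then picks.getD s 0 else a)) := by
            rintro ⟨hh, _⟩; omega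
          have h2 : ¬ (s ≤ i ∧ pvM picks s i < a) := by
            rintro ⟨hh, _⟩; exact his (by omega)
          rw [if_neg h1, if_neg h2]

def pvCell (apples picks : List Int) (i : Nat) : Int :=
  (apples.map (fun a =>
    if pvM picks 0 i < a then min (picks.getD i 0) (a - pvP picks i) else 0)).sum

theorem length_pickInnerA (picks : List Int) (day : Nat) (a : Int) (i : Nat) (out : List Int) :
    (pickInnerA picks day a i out).length = out.length := by
  induction a, i, out using pickInnerA.induct picks day with
  | case1 a i out h pi p ih => rw [pickInnerA]; simp [h]; simpa using ih
  | case2 a i out h => rw [pickInnerA]; simp [h]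

theorem foldA_getD (picks apples : List Int) (out : List Int)
    (hlen : out.length = picks.length)
    (i : Nat) (hi : i < picks.length) :
    (apples.foldl (fun out a => pickInnerA picks picks.length a 0 out) out).getD i 0 =
      out.getD i 0 + pvCell apples picks i := by
  induction apples generalizing out with
  | nil => simp [pvCell]
  | cons a rest ih =>
      rw [List.foldl_cons]
      rw [ih _ (by rw [length_pickInnerA]; exact hlen)]
      rw [pickInnerA_getD picks picks.length a 0 out rfl hlen i hi]
      have h0 : pvP picks 0 = 0 := by simp [pvP]
      simp only [Nat.zero_le, true_and, h0, sub_zero]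
      simp [pvCell]
      ring

theorem length_foldA (picks apples : List Int) (out : List Int) :
    (apples.foldl (fun out a => pickInnerA picks picks.length a 0 out) out).length = out.length := by
  induction apples generalizing out with
  | nil => rfl
  | cons a rest ih => rw [List.foldl_cons, ih, length_pickInnerA]

theorem pick_fruit_getD (apples picks : List Int)
    (i : Nat) (hi : i < picks.length) :
    (pick_fruit apples picks).getD i 0 = pvCell apples picks i := by
  unfold pick_fruit
  rw [foldA_getD picks apples _ (by simp) i hi]
  simp

theorem length_pick_fruit (apples picks : List Int) :
    (pick_fruit apples picks).length = picks.length := by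
  unfold pick_fruit; rw [length_foldA]; simp

-- sortedness of xs in getD form
theorem sorted_getD (xs : List Int) (hs : xs.Pairwise (fun a b => a ≤ b))
    (i j : Nat) (hij : i ≤ j) (hj : j < xs.length) : xs.getD i 0 ≤ xs.getD j 0 := by
  rcases Nat.lt_or_ge i j with hlt | hge
  · rw [List.getD_eq_getElem xs 0 (by omega), List.getD_eq_getElem xs 0 hj]
    exact List.pairwise_iff_getElem.mp hs i j (by omega) hj hlt
  · have : i = j := by omega
    subst this; exact le_refl _

-- full specification of the bisect loop on a sorted list
theorem blLoop_spec (xs : List Int) (x : Int) (hs : xs.Pairwise (fun a b => a ≤ b)) :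
    ∀ (fuel lo hi : Nat), lo ≤ hi → hi ≤ xs.length → hi - lo ≤ fuel →
      lo ≤ blLoop xs x fuel lo hi ∧ blLoop xs x fuel lo hi ≤ hi ∧
      (∀ j, lo ≤ j → j < blLoop xs x fuel lo hi → xs.getD j 0 < x) ∧
      (∀ j, blLoop xs x fuel lo hi ≤ j → j < hi → x ≤ xs.getD j 0) := by
  intro fuel
  induction fuel with
  | zero =>
      intro lo hi h1 h2 h3
      have : lo = hi := by omega
      subst this
      rw [blLoop]
      exact ⟨le_refl _, le_refl _, fun j ha hb => by omega, fun j ha hb => by omega⟩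
  | succ f ih =>
      intro lo hi h1 h2 h3
      rw [blLoop]
      by_cases hlh : lo < hi
      · rw [if_pos hlh]
        have hmid : (lo + hi) / 2 < xs.length := by omega
        rw [List.getElem?_eq_getElem hmid]
        simp only []
        have hmd : xs[(lo + hi) / 2] = xs.getD ((lo + hi) / 2) 0 :=
          (List.getD_eq_getElem xs 0 hmid).symm
        by_cases hy : xs[(lo + hi) / 2] < x
        · rw [if_pos hy]
          obtain ⟨c1, c2, c3, c4⟩ := ih ((lo + hi) / 2 + 1) hi (by omega) h2 (by omega)
          refine ⟨by omega, c2, ?_, c4⟩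
          intro j hj1 hj2
          by_cases hjm : j ≤ (lo + hi) / 2
          · calc xs.getD j 0 ≤ xs.getD ((lo + hi) / 2) 0 := sorted_getD xs hs j _ hjm hmid
              _ < x := by rw [← hmd]; exact hy
          · exact c3 j (by omega) hj2
        · rw [if_neg hy]
          obtain ⟨c1, c2, c3, c4⟩ := ih lo ((lo + hi) / 2) (by omega) (by omega) (by omega)
          refine ⟨c1, by omega, c3, ?_⟩
          intro j hj1 hj2
          by_cases hjm : (lo + hi) / 2 ≤ j
          · calc x ≤ xs.getD ((lo + hi) / 2) 0 := by rw [← hmd]; omega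
              _ ≤ xs.getD j 0 := sorted_getD xs hs _ j hjm (by omega)
          · exact c4 j hj1 (by omega)
      · rw [if_neg hlh]
        exact ⟨le_refl _, by omega, fun j ha hb => by omega, fun j ha hb => by omega⟩

theorem blFrom_spec (xs : List Int) (x : Int) (lo : Nat)
    (hs : xs.Pairwise (fun a b => a ≤ b)) (hlo : lo ≤ xs.length) :
    lo ≤ blFrom xs x lo ∧ blFrom xs x lo ≤ xs.length ∧
    (∀ j, lo ≤ j → j < blFrom xs x lo → xs.getD j 0 < x) ∧
    (∀ j, blFrom xs x lo ≤ j → j < xs.length → x ≤ xs.getD j 0) :=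
  blLoop_spec xs x hs xs.length lo xs.length hlo (le_refl _) (by omega)

-- unbounded bisect (lo = 0), the proof-side normal form
def bl (xs : List Int) (x : Int) : Nat := blFrom xs x 0

theorem bl_spec (xs : List Int) (x : Int) (hs : xs.Pairwise (fun a b => a ≤ b)) :
    bl xs x ≤ xs.length ∧
      (∀ j, j < bl xs x → xs.getD j 0 < x) ∧
      (∀ j, bl xs x ≤ j → j < xs.length → x ≤ xs.getD j 0) := by
  obtain ⟨c1, c2, c3, c4⟩ := blFrom_spec xs x 0 hs (by omega)
  exact ⟨c2, fun j hj => c3 j (by omega) hj, c4⟩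

theorem bl_mono (xs : List Int) (x y : Int) (hxy : x ≤ y)
    (hs : xs.Pairwise (fun a b => a ≤ b)) : bl xs x ≤ bl xs y := by
  obtain ⟨hx1, hx2, hx3⟩ := bl_spec xs x hs
  obtain ⟨hy1, hy2, hy3⟩ := bl_spec xs y hs
  by_contra hlt
  have hj : bl xs y < xs.length := by omega
  have h1 := hx2 (bl xs y) (by omega)
  have h2 := hy3 (bl xs y) (le_refl _) hj
  omega

-- a lower-bounded bisect is the unbounded one clamped below by the bound
theorem blFrom_eq_max (xs : List Int) (x : Int) (lo : Nat)
    (hs : xs.Pairwise (fun a b => a ≤ b)) (hlo : lo ≤ xs.length) :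
    blFrom xs x lo = max lo (bl xs x) := by
  obtain ⟨a1, a2, a3, a4⟩ := blFrom_spec xs x lo hs hlo
  obtain ⟨b1, b2, b3⟩ := bl_spec xs x hs
  by_contra hne
  rcases Nat.lt_or_ge (blFrom xs x lo) (max lo (bl xs x)) with hlt | hge
  · -- blFrom < max lo bl; since lo ≤ blFrom, blFrom < bl
    have hr : blFrom xs x lo < bl xs x := by omega
    have h1 := b2 (blFrom xs x lo) hr
    have h2 := a4 (blFrom xs x lo) (le_refl _) (by omega)
    omega
  · have hgt : max lo (bl xs x) < blFrom xs x lo := by omega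
    have h1 := a3 (max lo (bl xs x)) (by omega) hgt
    have h2 := b3 (max lo (bl xs x)) (by omega) (by omega)
    omega

theorem preB_fold (xs : List Int) : ∀ (acc : List Int), acc ≠ [] →
    xs.foldl (fun pre x => pre ++ [pre.getLastD 0 + x]) acc =
      acc ++ (List.range xs.length).map (fun m => acc.getLastD 0 + (xs.take (m+1)).sum) := by
  induction xs with
  | nil => intro acc h; simp
  | cons x rest ih =>
      intro acc h
      rw [List.foldl_cons, ih _ (by simp)]
      have hlast : (acc ++ [acc.getLastD 0 + x]).getLastD 0 = acc.getLastD 0 + x := by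
        cases acc with
        | nil => simp at h
        | cons y ys => simp [List.getLastD]
      rw [hlast]
      rw [List.length_cons, List.range_succ_eq_map]
      rw [List.map_cons, List.map_map, List.append_assoc]
      congr 1
      simp only [List.take_succ_cons, List.sum_cons, List.singleton_append]
      congr 1
      · simp
      · congr 1
        funext m
        simp [Function.comp]
        ring

theorem preB_getD (xs : List Int) (m : Nat) (hm : m ≤ xs.length) :
    (preB xs).getD m 0 = (xs.take m).sum := by
  unfold preB
  rw [preB_fold xs [0] (by simp)]
  cases m with
  | zero => simp
  | succ t =>
      have ht : t < xs.length := by omega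
      rw [List.getD_eq_getElem _ 0 (by simp; omega)]
      simp [ht]

theorem sum_take_range (xs : List Int) (k : Nat) (hk : k ≤ xs.length) :
    (xs.take k).sum = ∑ i ∈ Finset.range k, xs.getD i 0 := by
  induction k with
  | zero => simp
  | succ t ih =>
      rw [Finset.sum_range_succ, ← ih (by omega)]
      rw [List.getD_eq_getElem xs 0 (by omega), List.sum_take_succ]

theorem sum_ite_range (f : Nat → Int) (n k : Nat) (hk : k ≤ n) :
    ∑ i ∈ Finset.range n, (if i < k then f i else 0) = ∑ i ∈ Finset.range k, f i := by
  rw [← Finset.sum_filter]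
  congr 1
  ext i; simp; omega

theorem sum_map_range (xs : List Int) (g : Int → Int) :
    (xs.map g).sum = ∑ i ∈ Finset.range xs.length, g (xs.getD i 0) := by
  induction xs with
  | nil => simp
  | cons x rest ih =>
      rw [List.map_cons, List.sum_cons, ih, List.length_cons, Finset.sum_range_succ']
      simp
      ring

-- B's per-day closed form: sum over apples above the hurdle M of min(p, a - P)
theorem day_formula (xs : List Int) (hs : xs.Pairwise (fun a b => a ≤ b)) (P M p : Int) :
    ((preB xs).getD (if bl xs (P + p + 1) > bl xs (M + 1) then bl xs (P + p + 1) else bl xs (M + 1)) 0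
        - (preB xs).getD (bl xs (M + 1)) 0)
      - P * (((if bl xs (P + p + 1) > bl xs (M + 1) then bl xs (P + p + 1) else bl xs (M + 1)) : Int)
              - (bl xs (M + 1) : Int))
      + p * ((xs.length : Int)
              - ((if bl xs (P + p + 1) > bl xs (M + 1) then bl xs (P + p + 1) else bl xs (M + 1)) : Int))
      = (xs.map (fun a => if M < a then min p (a - P) else 0)).sum := by
  obtain ⟨hm1, hm2, hm3⟩ := bl_spec xs (M + 1) hs
  obtain ⟨ht1, ht2, ht3⟩ := bl_spec xs (P + p + 1) hs
  set n := xs.length with hn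
  set m := bl xs (M + 1) with hmdef
  set t := bl xs (P + p + 1) with htdef
  set t2 := if t > m then t else m with ht2def
  have ht2a : m ≤ t2 ∧ t ≤ t2 ∧ (t2 = t ∨ t2 = m) ∧ t2 ≤ n := by
    rw [ht2def]; split_ifs <;> omega
  rw [preB_getD xs t2 (by omega), preB_getD xs m (by omega)]
  rw [sum_take_range xs t2 (by omega), sum_take_range xs m (by omega), sum_map_range]
  have ek : ∑ i ∈ Finset.range n, (if i < t2 then (1:Int) else 0) = (t2 : Int) := by
    rw [sum_ite_range (fun _ => (1:Int)) n t2 (by omega)]; simp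
  have ej : ∑ i ∈ Finset.range n, (if i < m then (1:Int) else 0) = (m : Int) := by
    rw [sum_ite_range (fun _ => (1:Int)) n m (by omega)]; simp
  have expand :
      ∑ i ∈ Finset.range n,
        ((if i < t2 then xs.getD i 0 else 0) - (if i < m then xs.getD i 0 else 0)
          - P * ((if i < t2 then (1:Int) else 0) - (if i < m then (1:Int) else 0))
          + p * (1 - (if i < t2 then (1:Int) else 0)))
      = (∑ i ∈ Finset.range t2, xs.getD i 0) - (∑ i ∈ Finset.range m, xs.getD i 0)
          - P * ((t2 : Int) - (m : Int)) + p * ((n : Int) - (t2 : Int)) := by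
    simp only [Finset.sum_add_distrib, Finset.sum_sub_distrib, ← Finset.mul_sum]
    rw [ek, ej, sum_ite_range (fun i => xs.getD i 0) n t2 (by omega),
        sum_ite_range (fun i => xs.getD i 0) n m (by omega)]
    simp
  have hcast : (if t > m then (t : Int) else (m : Int)) = (t2 : Int) := by
    rw [ht2def]; split_ifs <;> simp
  rw [hcast, ← expand]
  apply Finset.sum_congr rfl
  intro i hi
  have hin : i < n := Finset.mem_range.mp hi
  by_cases him : i < m
  · have h1 := hm2 i him
    have hit2 : i < t2 := by omega
    simp only [him, hit2, if_true]
    rw [if_neg (by omega)]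
    ring
  · have h1 := hm3 i (by omega) hin
    rw [if_pos (by omega : M < xs.getD i 0)]
    by_cases hit2 : i < t2
    · have hit : i < t := by omega
      have h2 := ht2 i hit
      simp only [him, hit2, if_true, if_false]
      rw [min_def]
      split_ifs <;> omega
    · have h2 := ht3 i (by omega) hin
      simp only [him, hit2, if_false]
      rw [min_def]
      split_ifs <;> omega

-- proof-side reading of one day's intake, in terms of the running-max hurdle M
def pvE (xs : List Int) (P M p : Int) : Int :=
  ((preB xs).getD (if bl xs (P + p + 1) > bl xs (M + 1) then bl xs (P + p + 1) else bl xs (M + 1)) 0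
      - (preB xs).getD (bl xs (M + 1)) 0)
    - P * (((if bl xs (P + p + 1) > bl xs (M + 1) then bl xs (P + p + 1) else bl xs (M + 1)) : Int)
            - (bl xs (M + 1) : Int))
    + p * ((xs.length : Int)
            - ((if bl xs (P + p + 1) > bl xs (M + 1) then bl xs (P + p + 1) else bl xs (M + 1)) : Int))

def pvDays (xs : List Int) : List Int → Int → Int → List Int
  | [], _, _ => []
  | p :: rest, P, M =>
      pvE xs P M p :: pvDays xs rest (P + p) (if P + p > M then P + p else M)

-- B's loop with its pointer state, as a recursion
def pvDays2 (xs : List Int) : List Int → Int → Nat → List Int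
  | [], _, _ => []
  | p :: rest, P, m =>
      (((preB xs).getD (blFrom xs (P + p + 1) (blFrom xs (P + 1) m)) 0
          - (preB xs).getD (blFrom xs (P + 1) m) 0)
        - P * ((blFrom xs (P + p + 1) (blFrom xs (P + 1) m) : Int) - (blFrom xs (P + 1) m : Int))
        + p * ((xs.length : Int) - (blFrom xs (P + p + 1) (blFrom xs (P + 1) m) : Int)))
        :: pvDays2 xs rest (P + p) (blFrom xs (P + 1) m)

theorem foldB (xs : List Int) (ps : List Int) : ∀ (P : Int) (m : Nat) (acc : List Int),
    (ps.foldl (fun (st : Int × Nat × List Int) p =>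
      let m := blFrom xs (st.1 + 1) st.2.1
      let hi := blFrom xs (st.1 + p + 1) m
      (st.1 + p, m,
       st.2.2 ++ [((preB xs).getD hi 0 - (preB xs).getD m 0) - st.1 * ((hi : Int) - (m : Int))
                  + p * ((xs.length : Int) - (hi : Int))]))
      (P, m, acc)).2.2 = acc ++ pvDays2 xs ps P m := by
  induction ps with
  | nil => intro P m acc; simp [pvDays2]
  | cons p rest ih =>
      intro P m acc
      rw [List.foldl_cons, ih, pvDays2]
      simp

-- the pointer state m of B's loop coincides with bl xs (M+1) of the hurdle analysis
theorem pvDays2_eq (xs : List Int) (hs : xs.Pairwise (fun a b => a ≤ b)) :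
    ∀ (ps : List Int) (P M : Int) (m : Nat), P ≤ M → m ≤ xs.length →
      max m (bl xs (P + 1)) = bl xs (M + 1) →
      pvDays2 xs ps P m = pvDays xs ps P M := by
  intro ps
  induction ps with
  | nil => intro P M m _ _ _; rfl
  | cons p rest ih =>
      intro P M m hPM hm hmax
      rw [pvDays2, pvDays]
      have hm' : blFrom xs (P + 1) m = bl xs (M + 1) := by
        rw [blFrom_eq_max xs (P + 1) m hs hm, hmax]
      have hblM : bl xs (M + 1) ≤ xs.length := (bl_spec xs (M + 1) hs).1
      have hhi : blFrom xs (P + p + 1) (blFrom xs (P + 1) m) =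
          (if bl xs (P + p + 1) > bl xs (M + 1) then bl xs (P + p + 1) else bl xs (M + 1)) := by
        rw [hm', blFrom_eq_max xs (P + p + 1) _ hs hblM]
        split_ifs <;> omega
      congr 1
      · rw [pvE, hhi, hm']
        split_ifs <;> simp
      · apply ih (P + p) (if P + p > M then P + p else M) (blFrom xs (P + 1) m)
          (by split_ifs <;> omega) (by rw [hm']; exact hblM)
        rw [hm']
        by_cases hc : P + p > M
        · rw [if_pos hc]
          have := bl_mono xs (M + 1) (P + p + 1) (by omega) hs
          omega
        · rw [if_neg hc]
          have := bl_mono xs (P + p + 1) (M + 1) (by omega) hs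
          omega

theorem length_pvDays (xs ps : List Int) (P M : Int) :
    (pvDays xs ps P M).length = ps.length := by
  induction ps generalizing P M with
  | nil => rfl
  | cons p rest ih => simp [pvDays, ih]

-- the M-state of B's hurdle recursion at the start of day t
def pvMState (P M : Int) : List Int → Nat → Int
  | _, 0 => M
  | [], _ + 1 => M
  | p :: rest, t + 1 => pvMState (P + p) (if P + p > M then P + p else M) rest t

theorem pvDays_getD (xs : List Int) (hs : xs.Pairwise (fun a b => a ≤ b))
    (ps : List Int) (P M : Int) (t : Nat) (ht : t < ps.length) :
    (pvDays xs ps P M).getD t 0 =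
      (xs.map (fun a =>
        if pvMState P M ps t < a then min (ps.getD t 0) (a - (P + pvP ps t)) else 0)).sum := by
  induction ps generalizing P M t with
  | nil => simp at ht
  | cons p rest ih =>
      cases t with
      | zero =>
          rw [pvDays]
          simp only [List.getD_cons_zero, pvMState, pvP, List.take_zero, List.sum_nil, add_zero]
          exact day_formula xs hs P M p
      | succ t' =>
          rw [pvDays]
          simp only [List.getD_cons_succ, pvMState]
          rw [ih (P + p) (if P + p > M then P + p else M) t'
            (by simp only [List.length_cons] at ht; omega)]
          have hP : pvP (p :: rest) (t' + 1) = p + pvP rest t' := by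
            simp [pvP, List.take_succ_cons]
          rw [hP, add_assoc]

-- pvM over the empty list is 0
theorem pvM_nil (s i : Nat) : pvM ([] : List Int) s i = 0 := by
  induction s using pvM.induct i with
  | case1 s h ih => rw [pvM, if_pos h]; simp [ih]
  | case2 s h => rw [pvM, if_neg h]

-- shift lemma: pvM only looks at the segment [s..i)
theorem pvM_shift (p : Int) (rest : List Int) : ∀ (s i : Nat),
    pvM (p :: rest) (s + 1) (i + 1) = pvM rest s i := by
  intro s i
  induction s using pvM.induct i with
  | case1 s h ih =>
      conv_lhs => rw [pvM, if_pos (show s + 1 < i + 1 by omega)]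
      conv_rhs => rw [pvM, if_pos h]
      simp only [List.getD_cons_succ]
      rw [ih]
  | case2 s h =>
      conv_lhs => rw [pvM, if_neg (show ¬ (s + 1 < i + 1) by omega)]
      conv_rhs => rw [pvM, if_neg h]

theorem pvMState_eq (ps : List Int) : ∀ (P M : Int) (t : Nat), P ≤ M →
    pvMState P M ps t = max M (P + pvM ps 0 t) := by
  induction ps with
  | nil =>
      intro P M t hPM
      cases t with
      | zero => simp [pvMState, pvM_self]; omega
      | succ t' =>
          rw [pvMState, pvM_nil]
          omega
  | cons p rest ih =>
      intro P M t hPM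
      cases t with
      | zero => simp [pvMState, pvM_self]; omega
      | succ t' =>
          rw [pvMState]
          rw [ih (P + p) (if P + p > M then P + p else M) t' (by split_ifs <;> omega)]
          have hM1 : pvM (p :: rest) 0 (t' + 1) = max 0 (p + pvM rest 0 t') := by
            rw [pvM, if_pos (by omega)]
            simp only [List.getD_cons_zero]
            rw [show pvM (p :: rest) 1 (t' + 1) = pvM rest 0 t' from pvM_shift p rest 0 t']
          rw [hM1]
          have hK := pvM_nonneg rest 0 t'
          split_ifs <;> omega

theorem pick_fruit_alt_eq (apples picks : List Int) :
    pick_fruit_alt apples picks =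
      pvDays (PySem.List.sorted apples (fun x => x) false) picks 0 0 := by
  unfold pick_fruit_alt
  simp only []
  rw [foldB]
  rw [pvDays2_eq _ (PySem.List.sorted_pairwise apples (fun x => x)) picks 0 0 0
    (le_refl 0) (by omega) (by omega)]
  simp

theorem length_pick_fruit_alt (apples picks : List Int) :
    (pick_fruit_alt apples picks).length = picks.length := by
  rw [pick_fruit_alt_eq, length_pvDays]

theorem pick_fruit_alt_getD (apples picks : List Int)
    (i : Nat) (hi : i < picks.length) :
    (pick_fruit_alt apples picks).getD i 0 = pvCell apples picks i := by
  rw [pick_fruit_alt_eq]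
  have hs : (PySem.List.sorted apples (fun x => x) false).Pairwise (fun a b => a ≤ b) :=
    PySem.List.sorted_pairwise apples (fun x => x)
  rw [pvDays_getD _ hs picks 0 0 i hi]
  have hMs : pvMState 0 0 picks i = pvM picks 0 i := by
    rw [pvMState_eq picks 0 0 i (le_refl 0)]
    have := pvM_nonneg picks 0 i
    omega
  have hperm := PySem.List.sorted_perm apples (fun x => x) false
  unfold pvCell
  rw [List.Perm.sum_eq (hperm.map _)]
  rw [hMs]
  simp


-- ===== VERDICT (by name: the statement is the Claim_ definition above) =====
theorem pick_fruit_spec : Claim_equal_pick_fruit := by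
  intro apples picks _
  unfold Spec_pick_fruit
  apply List.ext_getElem
  · rw [length_pick_fruit, length_pick_fruit_alt]
  · intro i h1 h2
    have hi : i < picks.length := by rwa [length_pick_fruit] at h1
    have e1 := pick_fruit_getD apples picks i hi
    have e2 := pick_fruit_alt_getD apples picks i hi
    rw [List.getD_eq_getElem?_getD, List.getElem?_eq_getElem h1] at e1
    rw [List.getD_eq_getElem?_getD, List.getElem?_eq_getElem h2] at e2
    simp at e1 e2
    rw [e1, e2]
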